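-- pv_equiv track=rewrite | github.com/gtmc-dev/Articles | _scripts/meta.py | order_frontmatter_by_template
-- ===== SOURCE A (Python) =====
-- def order_frontmatter_by_template(frontmatter: dict, template: dict) -> dict:
--     ordered = {}
--     for key in template.keys():
--         if key in frontmatter:
--             ordered[key] = frontmatter[key]
--
--     for key, value in frontmatter.items():
--         if key not in ordered:
--             ordered[key] = value
--
--     return ordered
-- ===== SOURCE B (Python) =====
-- def order_frontmatter_by_template(frontmatter: dict, template: dict) -> dict:
--     # Rank every key: template keys get their template position, the rest get
--     # len(template) + their original position; one stable sort by rank then orders everything.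
--     rank = {key: i for i, key in enumerate(template)}
--     base = len(template)
--     for i, key in enumerate(frontmatter):
--         if key not in rank:
--             rank[key] = base + i
--     keys = sorted(frontmatter, key=rank.__getitem__)
--     return {key: frontmatter[key] for key in keys}
-- ===== Notes on version B (the rewrite author's own statement) =====
-- stated objective: alternative
-- what changed: Replaces A's two dict-building insertion passes by computing a numeric rank for every key (template position, else len(template)+original position) and producing the result with one stable sort of the keys.
import Mathlib
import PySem

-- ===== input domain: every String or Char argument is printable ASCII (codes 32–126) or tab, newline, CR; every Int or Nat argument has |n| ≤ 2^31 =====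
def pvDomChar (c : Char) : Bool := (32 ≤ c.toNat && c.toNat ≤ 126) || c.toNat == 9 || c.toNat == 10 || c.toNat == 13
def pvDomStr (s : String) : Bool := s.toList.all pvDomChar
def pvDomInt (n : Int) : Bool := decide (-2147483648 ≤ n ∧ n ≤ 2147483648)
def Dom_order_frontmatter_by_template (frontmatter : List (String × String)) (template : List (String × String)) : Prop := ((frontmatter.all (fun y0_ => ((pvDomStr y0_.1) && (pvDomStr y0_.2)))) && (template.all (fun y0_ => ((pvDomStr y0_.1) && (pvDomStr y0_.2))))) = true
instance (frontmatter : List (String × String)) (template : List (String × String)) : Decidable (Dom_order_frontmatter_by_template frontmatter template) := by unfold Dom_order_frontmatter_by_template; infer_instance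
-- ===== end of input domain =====

-- B replaces A's two insertion passes by ranking every key (template position, else
-- len(template)+original position) and doing ONE stable sort of the keys; objective: alternative.

-- ===== PORT A =====
def order_frontmatter_by_template (frontmatter : List (String × String)) (template : List (String × String)) : List (String × String) :=
  -- ordered = {}
  -- for key in template.keys(): if key in frontmatter: ordered[key] = frontmatter[key]
  let fmD : PySem.Dict String String := PySem.Dict.mk frontmatter
  let ordered : PySem.Dict String String :=
    template.foldl (fun d kv =>
      if fmD.contains kv.1 then d.insert kv.1 (fmD.getD kv.1 "") else d) PySem.Dict.empty
  -- for key, value in frontmatter.items(): if key not in ordered: ordered[key] = value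
  let ordered : PySem.Dict String String :=
    frontmatter.foldl (fun d kv =>
      if d.contains kv.1 then d else d.insert kv.1 kv.2) ordered
  ordered.items

-- ===== PORT B =====
def order_frontmatter_by_template_alt (frontmatter : List (String × String)) (template : List (String × String)) : List (String × String) :=
  -- rank = {key: i for i, key in enumerate(template)}
  let rank0 : PySem.Dict String Int :=
    (PySem.List.enumerate (template.map Prod.fst)).foldl
      (fun d p => d.insert p.2 p.1) PySem.Dict.empty
  -- base = len(template)
  let base : Int := (template.length : Int)
  -- for i, key in enumerate(frontmatter): if key not in rank: rank[key] = base + i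
  let rank : PySem.Dict String Int :=
    (PySem.List.enumerate (frontmatter.map Prod.fst)).foldl
      (fun d p => if d.contains p.2 then d else d.insert p.2 (base + p.1)) rank0
  -- keys = sorted(frontmatter, key=rank.__getitem__)  (rank[k] exists for every k; getD's default is never read)
  let keys : List String :=
    PySem.List.sorted (frontmatter.map Prod.fst) (fun k => rank.getD k 0) false
  -- {key: frontmatter[key] for key in keys}
  keys.map (fun k => (k, (PySem.Dict.mk frontmatter).getD k ""))

-- ===== PRECONDITION & SPEC =====
-- Pre_ excludes association lists with duplicate keys: both parameters are Python dicts, which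
-- cannot hold duplicate keys, so such lists represent no input of A.
def Pre_order_frontmatter_by_template (frontmatter : List (String × String)) (template : List (String × String)) : Prop :=
  (frontmatter.map Prod.fst).Nodup ∧ (template.map Prod.fst).Nodup
instance (frontmatter : List (String × String)) (template : List (String × String)) : Decidable (Pre_order_frontmatter_by_template frontmatter template) := by unfold Pre_order_frontmatter_by_template; infer_instance

def pvWitness_order_frontmatter_by_template : (List (String × String)) × (List (String × String)) :=
  ([("title", "T"), ("extra", "x"), ("date", "2024")], [("date", ""), ("title", ""), ("tags", "")])

def Spec_order_frontmatter_by_template (frontmatter : List (String × String)) (template : List (String × String)) (out : List (String × String)) : Prop := out = order_frontmatter_by_template_alt frontmatter template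
instance (frontmatter : List (String × String)) (template : List (String × String)) (out : List (String × String)) : Decidable (Spec_order_frontmatter_by_template frontmatter template out) := by unfold Spec_order_frontmatter_by_template; infer_instance

-- ===== CLAIM (what is proved, stated in full; the proofs are below) =====
def Claim_equal_order_frontmatter_by_template : Prop := ∀ (frontmatter : List (String × String)) (template : List (String × String)), Dom_order_frontmatter_by_template frontmatter template → Pre_order_frontmatter_by_template frontmatter template → Spec_order_frontmatter_by_template frontmatter template (order_frontmatter_by_template frontmatter template)

-- ===== LEMMAS AND PROOFS =====

-- A foldl whose step fires only when a data-only test holds is the foldl over the filtered list.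
theorem foldl_if_filter {α β : Type} (l : List β) (p : β → Bool) (g : α → β → α) (a : α) :
    l.foldl (fun acc b => if p b then g acc b else acc) a = (l.filter p).foldl g a := by
  induction l generalizing a with
  | nil => rfl
  | cons x xs ih =>
    by_cases h : p x = true <;> simp [List.foldl_cons, h, ih]

-- "insert if absent" over distinct keys appends exactly the entries whose key is new.
theorem items_foldl_insert_if_absent {κ ν β : Type} [BEq κ] [LawfulBEq κ]
    (l : List β) (key : β → κ) (val : β → ν) (d : PySem.Dict κ ν)
    (hnd : (l.map key).Nodup) :
    (l.foldl (fun d b => if d.contains (key b) then d else d.insert (key b) (val b)) d).items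
      = d.items ++ (l.filter (fun b => !(d.contains (key b)))).map (fun b => (key b, val b)) := by
  induction l generalizing d with
  | nil => simp
  | cons x xs ih =>
    simp only [List.map_cons, List.nodup_cons] at hnd
    by_cases h : d.contains (key x) = true
    · simp only [List.foldl_cons, h, if_true, List.filter_cons, Bool.not_true,
        Bool.false_eq_true, if_false]
      exact ih d hnd.2
    · simp only [List.foldl_cons, h, List.filter_cons, Bool.false_eq_true, if_false,
        Bool.not_false, if_true]
      rw [ih (d.insert (key x) (val x)) hnd.2,
        PySem.Dict.items_insert_of_not_contains _ _ (by simpa using h)]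
      have hfilter : xs.filter (fun b => !((d.insert (key x) (val x)).contains (key b)))
          = xs.filter (fun b => !(d.contains (key b))) := by
        apply List.filter_congr
        intro b hb
        have hne : key b ≠ key x := fun hc => hnd.1 (hc ▸ List.mem_map_of_mem hb)
        simp [PySem.Dict.contains_insert, hne]
      simp [hfilter]

theorem map_filter_comm {α β : Type} (f : α → β) (p : β → Bool) (l : List α) :
    (l.filter (fun x => p (f x))).map f = (l.map f).filter p := by
  induction l with
  | nil => rfl
  | cons x xs ih => by_cases h : p (f x) = true <;> simp [h, ih]

-- specialised instances of the two foldl lemmas, written with the exact lambdas of the ports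

theorem d1_items_aux (fmD : PySem.Dict String String) (l : List (String × String))
    (hnd : (l.map Prod.fst).Nodup) :
    (l.foldl (fun d kv => d.insert kv.1 (fmD.getD kv.1 "")) PySem.Dict.empty).items
      = l.map (fun kv => (kv.1, fmD.getD kv.1 "")) := by
  have := PySem.Dict.items_foldl_insert_fresh l Prod.fst (fun kv => fmD.getD kv.1 "")
    PySem.Dict.empty (fun a _ => by simp) hnd
  simpa using this

theorem d2_items_aux (l : List (String × String)) (d : PySem.Dict String String)
    (hnd : (l.map Prod.fst).Nodup) :
    (l.foldl (fun d kv => if d.contains kv.1 then d else d.insert kv.1 kv.2) d).items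
      = d.items ++ l.filter (fun kv => !(d.contains kv.1)) := by
  have := items_foldl_insert_if_absent l Prod.fst Prod.snd d hnd
  simpa using this

theorem rank0_items_aux (l : List String) (hnd : l.Nodup) :
    ((PySem.List.enumerate l).foldl (fun d p => d.insert p.2 p.1) PySem.Dict.empty).items
      = (PySem.List.enumerate l).map (fun p => (p.2, p.1)) := by
  have := PySem.Dict.items_foldl_insert_fresh (PySem.List.enumerate l) Prod.snd Prod.fst
    PySem.Dict.empty (fun a _ => by simp)
    (by rw [show (PySem.List.enumerate l).map Prod.snd
              = (PySem.List.enumerate l).map (fun p => p.2) from rfl,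
            PySem.List.map_snd_enumerate]; exact hnd)
  simpa using this

theorem rank_items_aux (l : List String) (base : Int) (d : PySem.Dict String Int)
    (hnd : l.Nodup) :
    ((PySem.List.enumerate l).foldl
        (fun d p => if d.contains p.2 then d else d.insert p.2 (base + p.1)) d).items
      = d.items ++ ((PySem.List.enumerate l).filter (fun p => !(d.contains p.2))).map
          (fun p => (p.2, base + p.1)) := by
  have := items_foldl_insert_if_absent (PySem.List.enumerate l) Prod.snd
    (fun p => base + p.1) d
    (by rw [show (PySem.List.enumerate l).map Prod.snd
              = (PySem.List.enumerate l).map (fun p => p.2) from rfl,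
            PySem.List.map_snd_enumerate]; exact hnd)
  simpa using this

-- ===== the A side reduced to a filter/append normal form =====
theorem a_eq_target (fm tpl : List (String × String))
    (hfm : (fm.map Prod.fst).Nodup) (htpl : (tpl.map Prod.fst).Nodup) :
    order_frontmatter_by_template fm tpl
      = (tpl.filter (fun kv => decide (kv.1 ∈ fm.map Prod.fst))).map
          (fun kv => (kv.1, (PySem.Dict.mk fm).getD kv.1 ""))
        ++ fm.filter (fun kv => !decide (kv.1 ∈ tpl.map Prod.fst)) := by
  simp only [order_frontmatter_by_template]
  set fmK := fm.map Prod.fst with hfmK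
  set tplK := tpl.map Prod.fst with htplK
  set fmD : PySem.Dict String String := PySem.Dict.mk fm with hfmD
  have hcontains_fmD : ∀ k, fmD.contains k = decide (k ∈ fmK) := by
    intro k; rw [PySem.Dict.contains_eq_decide_mem_keys]; rfl
  set d1 := tpl.foldl
    (fun d kv => if fmD.contains kv.1 then d.insert kv.1 (fmD.getD kv.1 "") else d)
    PySem.Dict.empty with hd1def
  have hd1 : d1.items = (tpl.filter (fun kv => decide (kv.1 ∈ fmK))).map
      (fun kv => (kv.1, fmD.getD kv.1 "")) := by
    rw [hd1def, foldl_if_filter, d1_items_aux]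
    · congr 1
      apply List.filter_congr
      intro kv _; exact hcontains_fmD kv.1
    · exact htpl.sublist (List.Sublist.map _ List.filter_sublist)
  have hd1keys : d1.keys = (tpl.filter (fun kv => decide (kv.1 ∈ fmK))).map Prod.fst := by
    simp [PySem.Dict.keys, hd1, List.map_map, Function.comp]
  have hd1contains : ∀ kv ∈ fm, d1.contains kv.1 = decide (kv.1 ∈ tplK) := by
    intro kv hkv
    rw [PySem.Dict.contains_eq_decide_mem_keys, hd1keys]
    have hmemfm : kv.1 ∈ fmK := List.mem_map_of_mem hkv
    rw [decide_eq_decide]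
    constructor
    · intro hc
      obtain ⟨u, hu, hu1⟩ := List.mem_map.mp hc
      exact hu1 ▸ List.mem_map_of_mem (List.mem_of_mem_filter hu)
    · intro h
      obtain ⟨u, hu, hu1⟩ := List.mem_map.mp h
      exact List.mem_map.mpr ⟨u, List.mem_filter.mpr ⟨hu, by simp [hu1, hmemfm]⟩, hu1⟩
  rw [d2_items_aux fm d1 hfm, hd1]
  congr 1
  apply List.filter_congr
  intro kv hkv
  rw [hd1contains kv hkv]

-- ===== the B side reduced to the same normal form =====
theorem alt_eq_target (fm tpl : List (String × String))
    (hfm : (fm.map Prod.fst).Nodup) (htpl : (tpl.map Prod.fst).Nodup) :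
    order_frontmatter_by_template_alt fm tpl
      = ((tpl.map Prod.fst).filter (fun k => decide (k ∈ fm.map Prod.fst))
          ++ (fm.map Prod.fst).filter (fun k => !decide (k ∈ tpl.map Prod.fst))).map
            (fun k => (k, (PySem.Dict.mk fm).getD k "")) := by
  simp only [order_frontmatter_by_template_alt]
  set fmK := fm.map Prod.fst with hfmK
  set tplK := tpl.map Prod.fst with htplK
  set rank0 := (PySem.List.enumerate tplK).foldl (fun d p => d.insert p.2 p.1)
    PySem.Dict.empty with hr0
  set rank := (PySem.List.enumerate fmK).foldl
    (fun d p => if d.contains p.2 then d else d.insert p.2 ((tpl.length : Int) + p.1)) rank0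
    with hr
  have h0items : rank0.items = (PySem.List.enumerate tplK).map (fun p => (p.2, p.1)) :=
    rank0_items_aux tplK htpl
  have h0keys : rank0.keys = tplK := by
    simp only [PySem.Dict.keys, h0items, List.map_map]
    exact PySem.List.map_snd_enumerate tplK 0
  have h0contains : ∀ k, rank0.contains k = decide (k ∈ tplK) := by
    intro k; rw [PySem.Dict.contains_eq_decide_mem_keys, h0keys]
  have hitems : rank.items
      = (PySem.List.enumerate tplK).map (fun p => (p.2, p.1))
        ++ ((PySem.List.enumerate fmK).filter (fun p => !decide (p.2 ∈ tplK))).map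
            (fun p => (p.2, (tpl.length : Int) + p.1)) := by
    rw [hr, rank_items_aux fmK _ rank0 hfm, h0items]
    congr 1
    simp only [h0contains]
  have hkeys : rank.keys = tplK ++ fmK.filter (fun k => !decide (k ∈ tplK)) := by
    simp only [PySem.Dict.keys, hitems, List.map_append, List.map_map]
    congr 1
    · exact PySem.List.map_snd_enumerate tplK 0
    · rw [show ((PySem.List.enumerate fmK).filter (fun p => !decide (p.2 ∈ tplK))).map
            ((fun p : String × Int => p.1) ∘ (fun p : Int × String => (p.2, (tpl.length : Int) + p.1)))
          = ((PySem.List.enumerate fmK).filter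
              (fun p => (fun k => !decide (k ∈ tplK)) p.2)).map (fun p : Int × String => p.2)
          from rfl,
        map_filter_comm (fun p : Int × String => p.2) (fun k => !decide (k ∈ tplK)),
        PySem.List.map_snd_enumerate]
  have hnodupkeys : rank.keys.Nodup := by
    rw [hkeys]
    refine List.Nodup.append htpl (hfm.filter _) ?_
    intro a ha hb
    have := List.of_mem_filter hb
    simp only [Bool.not_eq_true', decide_eq_false_iff_not] at this
    exact this ha
  have hgetT : ∀ (j : ℕ) (hj : j < tplK.length), rank.getD tplK[j] 0 = (j : Int) := by
    intro j hj
    refine PySem.Dict.getD_of_mem_items rank ?_ hnodupkeys 0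
    rw [hitems]
    apply List.mem_append_left
    have : ((0 : Int) + (j : Int), tplK[j]) ∈ PySem.List.enumerate tplK :=
      (PySem.List.mem_enumerate_iff tplK 0 _).mpr ⟨j, hj, rfl⟩
    have h2 := List.mem_map_of_mem (f := fun p : Int × String => (p.2, p.1)) this
    simpa using h2
  have hgetF : ∀ (j : ℕ) (hj : j < fmK.length), fmK[j] ∉ tplK →
      rank.getD fmK[j] 0 = (tpl.length : Int) + (j : Int) := by
    intro j hj hnot
    refine PySem.Dict.getD_of_mem_items rank ?_ hnodupkeys 0
    rw [hitems]
    apply List.mem_append_right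
    have h1 : ((0 : Int) + (j : Int), fmK[j]) ∈ PySem.List.enumerate fmK :=
      (PySem.List.mem_enumerate_iff fmK 0 _).mpr ⟨j, hj, rfl⟩
    have h2 : ((0 : Int) + (j : Int), fmK[j]) ∈
        (PySem.List.enumerate fmK).filter (fun p => !decide (p.2 ∈ tplK)) :=
      List.mem_filter.mpr ⟨h1, by simpa using hnot⟩
    have h3 := List.mem_map_of_mem (f := fun p : Int × String => (p.2, (tpl.length : Int) + p.1)) h2
    simpa using h3
  have hperm : (tplK.filter (fun k => decide (k ∈ fmK))
      ++ fmK.filter (fun k => !decide (k ∈ tplK))).Perm fmK := by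
    have h1 : (tplK.filter (fun k => decide (k ∈ fmK))).Perm
        (fmK.filter (fun k => decide (k ∈ tplK))) := by
      rw [List.perm_ext_iff_of_nodup (htpl.filter _) (hfm.filter _)]
      intro a
      simp only [List.mem_filter, decide_eq_true_eq]
      exact and_comm
    exact (h1.append (List.Perm.refl _)).trans
      (List.filter_append_perm (fun k => decide (k ∈ tplK)) fmK)
  have hpw : (tplK.filter (fun k => decide (k ∈ fmK))
      ++ fmK.filter (fun k => !decide (k ∈ tplK))).Pairwise
        (fun a b => rank.getD a 0 < rank.getD b 0) := by
    rw [List.pairwise_append]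
    refine ⟨?_, ?_, ?_⟩
    · refine List.Pairwise.filter _ ?_
      rw [List.pairwise_iff_getElem]
      intro i j hi hj hij
      rw [hgetT i hi, hgetT j hj]
      exact_mod_cast hij
    · have hall : fmK.Pairwise (fun a b => a ∉ tplK → b ∉ tplK →
          rank.getD a 0 < rank.getD b 0) := by
        rw [List.pairwise_iff_getElem]
        intro i j hi hj hij ha hb
        rw [hgetF i hi ha, hgetF j hj hb]
        have : (i : Int) < (j : Int) := by exact_mod_cast hij
        omega
      refine (hall.filter _).imp_of_mem ?_
      intro a b ha hb h
      have ha' := List.of_mem_filter ha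
      have hb' := List.of_mem_filter hb
      simp only [Bool.not_eq_true', decide_eq_false_iff_not] at ha' hb'
      exact h ha' hb'
    · intro a ha b hb
      have haT : a ∈ tplK := List.mem_of_mem_filter ha
      have hbF := List.of_mem_filter hb
      simp only [Bool.not_eq_true', decide_eq_false_iff_not] at hbF
      obtain ⟨i, hi, hia⟩ := List.mem_iff_getElem.mp haT
      obtain ⟨j, hj, hjb⟩ := List.mem_iff_getElem.mp (List.mem_of_mem_filter hb)
      rw [← hia, ← hjb, hgetT i hi, hgetF j hj (hjb ▸ hbF)]
      have hlen : tplK.length = tpl.length := by simp [htplK]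
      have : (i : Int) < (tpl.length : Int) := by
        have := hi; rw [hlen] at this; exact_mod_cast this
      omega
  rw [PySem.List.sorted_eq_of_perm_of_pairwise_lt fmK _ (fun k => rank.getD k 0) hperm hpw]


theorem order_frontmatter_spec_aux (fm tpl : List (String × String))
    (hfm : (fm.map Prod.fst).Nodup) (htpl : (tpl.map Prod.fst).Nodup) :
    order_frontmatter_by_template fm tpl = order_frontmatter_by_template_alt fm tpl := by
  rw [a_eq_target fm tpl hfm htpl, alt_eq_target fm tpl hfm htpl, List.map_append]
  congr 1
  · rw [← map_filter_comm Prod.fst (fun k => decide (k ∈ fm.map Prod.fst)) tpl,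
      List.map_map]
    rfl
  · rw [← map_filter_comm Prod.fst (fun k => !decide (k ∈ tpl.map Prod.fst)) fm,
      List.map_map]
    have : ∀ kv ∈ fm.filter (fun kv => !decide (kv.1 ∈ tpl.map Prod.fst)),
        ((fun k => (k, (PySem.Dict.mk fm).getD k "")) ∘ Prod.fst) kv = kv := by
      intro kv hkv
      have hmem : kv ∈ fm := List.mem_of_mem_filter hkv
      have : (PySem.Dict.mk fm).getD kv.1 "" = kv.2 :=
        PySem.Dict.getD_of_mem_items (PySem.Dict.mk fm)
          (by simpa [PySem.Dict.items] using hmem)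
          (by simpa [PySem.Dict.keys] using hfm) ""
      simp [Function.comp, this]
    rw [List.map_congr_left this]
    simp

-- ===== VERDICT (by name: the statement is the Claim_ definition above) =====
theorem order_frontmatter_by_template_spec : Claim_equal_order_frontmatter_by_template := by
  intro fm tpl _ hpre
  exact order_frontmatter_spec_aux fm tpl hpre.1 hpre.2
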